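-- pv_equiv track=rewrite | github.com/samarthvyas11/Codeforces_Problems | Common Divisors/common_divisors.py | check_repeatation
-- ===== SOURCE A (Python) =====
-- def check_repeatation(string):
--     l1 = len(string)
--     factors = []
--     for i in range(1,l1+1):
--         if l1 % i == 0:
--             factors.append(i)
--     repeated = []
--     for i in range(len(factors)):
--         found = True
--         s1 = string[:factors[i]]
--         j = factors[i]
--         while j < l1:
--             s2 = string[j:j+factors[i]]
--             j += factors[i]
--             if s1 != s2:
--                 found = False
--                 break
--         if found:
--             repeated.append(s1)
--
--     return repeated
-- ===== SOURCE B (Python) =====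
-- def check_repeatation(string):
--     n = len(string)
--     return [string[:d] for d in range(1, n + 1)
--             if n % d == 0 and string[:d] * (n // d) == string]
-- ===== Notes on version B (the rewrite author's own statement) =====
-- stated objective: faster
-- what changed: B replaces A's two-pass structure (build a divisor list, then for each divisor compare the string chunk by chunk in an explicit while loop) with a single comprehension that tests each divisor d by one repetition check string[:d] * (n // d) == string.
import Mathlib
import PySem

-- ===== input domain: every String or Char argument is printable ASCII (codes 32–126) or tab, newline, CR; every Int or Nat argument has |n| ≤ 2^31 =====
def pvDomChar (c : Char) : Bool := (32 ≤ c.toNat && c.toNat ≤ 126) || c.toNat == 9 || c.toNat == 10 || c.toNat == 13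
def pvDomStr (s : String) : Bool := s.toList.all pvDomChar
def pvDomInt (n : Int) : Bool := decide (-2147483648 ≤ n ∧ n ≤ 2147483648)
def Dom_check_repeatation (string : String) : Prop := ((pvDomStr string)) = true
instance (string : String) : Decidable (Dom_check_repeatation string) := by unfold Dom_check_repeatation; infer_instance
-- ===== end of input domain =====

-- B replaces A's per-divisor chunk-comparison while-loop by a single
-- `prefix * (n // d) == string` repetition test inside one comprehension
-- (objective: faster by a constant factor; same return value everywhere).

-- ===== PORT A =====
-- A's inner `while j < l1: s2 = string[j:j+f]; j += f; if s1 != s2: ...` loop.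
-- The `0 < f` part of the guard only makes the recursion total; A reaches this
-- loop only with f ≥ 1 (f is drawn from range(1, l1+1)).
def pvChunkLoop (s s1 : List Char) (f j : Int) : Bool :=
  if _h : 0 < f ∧ j < (s.length : Int) then
    if PySem.List.slice s (some j) (some (j + f)) = s1 then
      pvChunkLoop s s1 f (j + f)
    else false
  else true
termination_by ((s.length : Int) - j).toNat
decreasing_by omega

def check_repeatation (string : String) : List String :=
  let s := string.toList
  let l1 : Int := (s.length : Int)
  let factors : List Int :=
    (PySem.List.pyRange 1 (l1 + 1)).foldl
      (fun acc i => if PySem.Int.mod l1 i == 0 then acc ++ [i] else acc) []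
  -- `for i in range(len(factors)): ... factors[i]` visits the factors in order
  factors.foldl
    (fun repeated f =>
      if pvChunkLoop s (PySem.List.slice s none (some f)) f f then
        repeated ++ [String.ofList (PySem.List.slice s none (some f))]
      else repeated) []

-- ===== PORT B =====
def check_repeatation_alt (string : String) : List String :=
  let s := string.toList
  let n : Int := (s.length : Int)
  (PySem.List.pyRange 1 (n + 1)).filterMap
    (fun d =>
      if PySem.Int.mod n d == 0 &&
         (List.replicate (PySem.Int.floordiv n d).toNat
            (PySem.List.slice s none (some d))).flatten == s then
        some (String.ofList (PySem.List.slice s none (some d)))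
      else none)

-- ===== PRECONDITION & SPEC =====
def Spec_check_repeatation (string : String) (out : List String) : Prop := out = check_repeatation_alt string
instance (string : String) (out : List String) : Decidable (Spec_check_repeatation string out) := by unfold Spec_check_repeatation; infer_instance

-- ===== CLAIM (what is proved, stated in full; the proofs are below) =====
def Claim_equal_check_repeatation : Prop := ∀ (string : String), Dom_check_repeatation string → Spec_check_repeatation string (check_repeatation string)

-- ===== LEMMAS AND PROOFS =====

-- A's chunk loop starting at j accepts exactly when the rest of the string is
-- the right number of copies of s1 (invariant of the while loop).
lemma pvChunkLoop_iff (s s1 : List Char) (f : Nat) (hf : 0 < f) (hs1 : s1.length = f) :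
    ∀ (k j : Nat), s.length = j + k * f →
      (pvChunkLoop s s1 (f : Int) (j : Int) = true ↔
        s.drop j = (List.replicate k s1).flatten) := by
  intro k
  induction k with
  | zero =>
      intro j hj
      rw [pvChunkLoop]
      have : ¬ (0 < (f : Int) ∧ (j : Int) < (s.length : Int)) := by omega
      simp [List.drop_eq_nil_iff, hj]
  | succ k ih =>
      intro j hj
      have hjlt : j < s.length := by nlinarith
      rw [pvChunkLoop]
      have hcast : (j : Int) + (f : Int) = ((j + f : Nat) : Int) := by push_cast; ring
      have hguard : 0 < (f : Int) ∧ (j : Int) < (s.length : Int) := by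
        constructor <;> [exact_mod_cast hf; exact_mod_cast hjlt]
      rw [dif_pos hguard, hcast, PySem.List.slice_natCast]
      have htk : j + f - j = f := by omega
      rw [htk]
      have hrest : s.length = (j + f) + k * f := by rw [hj, Nat.succ_mul]; omega
      have ihx := ih (j + f) hrest
      rw [List.replicate_succ, List.flatten_cons]
      by_cases hc : (s.drop j).take f = s1
      · rw [if_pos hc, ihx]
        have hsplit : s.drop j = s1 ++ s.drop (j + f) := by
          nth_rewrite 1 [← List.take_append_drop f (s.drop j)]
          rw [hc, List.drop_drop]
        rw [hsplit]
        constructor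
        · intro h; rw [h]
        · intro h; exact List.append_cancel_left h
      · rw [if_neg hc]
        refine ⟨fun h => absurd h (by simp), fun h => absurd ?_ hc⟩
        have := congrArg (List.take s1.length) h
        rw [List.take_left, hs1] at this
        exact this

-- For a divisor d of |s| with 1 ≤ d ≤ |s|: A's loop test ⟺ B's repetition test.
lemma pvCond_iff (s : List Char) (d : Int) (h1 : 1 ≤ d) (h2 : d ≤ (s.length : Int))
    (hdvd : d ∣ (s.length : Int)) :
    (pvChunkLoop s (PySem.List.slice s none (some d)) d d = true ↔
      (List.replicate (PySem.Int.floordiv (s.length : Int) d).toNat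
        (PySem.List.slice s none (some d))).flatten = s) := by
  obtain ⟨f, rfl⟩ : ∃ f : Nat, d = (f : Int) := ⟨d.toNat, by omega⟩
  have hf : 0 < f := by exact_mod_cast h1
  have hfle : f ≤ s.length := by exact_mod_cast h2
  have hfdvd : f ∣ s.length := by exact_mod_cast hdvd
  have hslice : PySem.List.slice s none (some (f : Int)) = s.take f := by
    rw [PySem.List.slice_to s (by positivity)]; simp
  have hs1 : (s.take f).length = f := by simp [hfle]
  set m := s.length / f with hm
  have hmf : s.length = m * f := by
    rw [hm, Nat.div_mul_cancel hfdvd]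
  have hm1 : 1 ≤ m := (Nat.one_le_div_iff hf).mpr hfle
  have hfd : PySem.Int.floordiv (s.length : Int) (f : Int) = (m : Int) := by
    rw [PySem.Int.floordiv_natCast]
  have hlen : s.length = f + (m - 1) * f := by
    have : (m - 1) * f = m * f - f := by
      cases m with
      | zero => omega
      | succ m' => simp [Nat.succ_mul]
    omega
  have hmain := pvChunkLoop_iff s (s.take f) f hf hs1 (m - 1) f hlen
  rw [hslice, hmain, hfd]
  have hrep : (m : Int).toNat = (m - 1) + 1 := by omega
  rw [hrep, List.replicate_succ, List.flatten_cons]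
  have hsplit : s = s.take f ++ s.drop f := (List.take_append_drop f s).symm
  constructor
  · intro h
    conv_rhs => rw [hsplit]
    rw [h]
  · intro h
    have : s.take f ++ (List.replicate (m - 1) (s.take f)).flatten
         = s.take f ++ s.drop f := by rw [h]; exact hsplit
    exact (List.append_cancel_left this).symm

-- a comprehension `[g d for d in l if c d]` as filterMap equals map g ∘ filter c
lemma pvFilterMap_if {α β : Type} (c : α → Bool) (g : α → β) (l : List α) :
    (l.filterMap fun d => if c d then some (g d) else none)
      = (l.filter c).map g := by
  induction l with
  | nil => rfl
  | cons x xs ih =>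
      by_cases hx : c x
      · simp [hx, ih]
      · simp [hx, ih]

-- ===== VERDICT (by name: the statement is the Claim_ definition above) =====
theorem check_repeatation_spec : Claim_equal_check_repeatation := by
  intro string _dom
  unfold Spec_check_repeatation check_repeatation check_repeatation_alt
  simp only []
  set s := string.toList with hs
  set n : Int := (s.length : Int) with hn
  -- A's two append-if folds become filter/map passes
  rw [PySem.List.foldl_append_if (fun i => PySem.Int.mod n i == 0) (fun i => i)
        (PySem.List.pyRange 1 (n + 1)) []]
  rw [PySem.List.foldl_append_if
        (fun f => pvChunkLoop s (PySem.List.slice s none (some f)) f f)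
        (fun f => String.ofList (PySem.List.slice s none (some f)))
        _ []]
  rw [pvFilterMap_if]
  simp only [List.nil_append]
  rw [List.map_id', List.filter_filter]
  congr 1
  apply List.filter_congr
  intro d hd
  rw [PySem.List.mem_pyRange_one] at hd
  rw [hn] at hd ⊢
  by_cases hmod : PySem.Int.mod (s.length : Int) d = 0
  · have hdvd : d ∣ (s.length : Int) := (PySem.Int.mod_eq_zero_iff_dvd _ d).mp hmod
    have hiff := pvCond_iff s d hd.1 (by omega) hdvd
    simp only [hmod, beq_self_eq_true, Bool.and_true, Bool.true_and]
    rw [Bool.eq_iff_iff, beq_iff_eq]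
    exact hiff
  · have hm : (PySem.Int.mod (s.length : Int) d == 0) = false := by
      simp [hmod]
    simp [hm]
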